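-- pv_equiv track=rewrite | github.com/pdinklag/DVGamingPatch | mapping.py | javaMangle
-- ===== SOURCE A (Python) =====
-- javaPrimitiveMangling = {
--     'boolean': 'Z',
--     'char':    'C',
--     'double':  'D',
--     'float':   'F',
--     'int':     'I',
--     'long':    'J',
--     'short':   'S',
--     'void':    'V',
-- }
--
-- def javaMangle(typeName):
--     if typeName in javaPrimitiveMangling:
--         # primitive
--         return javaPrimitiveMangling[typeName]
--     elif typeName.endswith('[]'):
--         # array
--         return '[' + javaMangle(typeName[0:-2])
--     elif typeName.endswith('>'):
--         # generic class
--         openPos = typeName.find('<')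
--         return 'L' + typeName[:openPos] + '<' + ''.join(map(lambda x: javaMangle(x), typeName[openPos+1:-1].split(','))) + '>;'
--     else:
--         # class
--         return 'L' + typeName + ';'
-- ===== SOURCE B (Python) =====
-- javaPrimitiveMangling = {
--     'boolean': 'Z',
--     'char':    'C',
--     'double':  'D',
--     'float':   'F',
--     'int':     'I',
--     'long':    'J',
--     'short':   'S',
--     'void':    'V',
-- }
--
-- def javaMangle(typeName):
--     # strip all trailing '[]' dimensions in one loop, then classify the core once
--     dims = 0
--     while typeName.endswith('[]'):
--         typeName = typeName[0:-2]
--         dims += 1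
--     if typeName in javaPrimitiveMangling:
--         core = javaPrimitiveMangling[typeName]
--     elif typeName.endswith('>'):
--         openPos = typeName.find('<')
--         core = 'L' + typeName[:openPos] + '<' + ''.join(javaMangle(x) for x in typeName[openPos+1:-1].split(',')) + '>;'
--     else:
--         core = 'L' + typeName + ';'
--     return '[' * dims + core
-- ===== Notes on version B (the rewrite author's own statement) =====
-- stated objective: alternative
-- what changed: B replaces A's per-dimension recursion on trailing array-bracket suffixes by a single while loop that strips all array dimensions while counting them, then classifies the remaining core type exactly once (primitive / generic / plain class), recursing only into generic type arguments.
import Mathlib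
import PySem

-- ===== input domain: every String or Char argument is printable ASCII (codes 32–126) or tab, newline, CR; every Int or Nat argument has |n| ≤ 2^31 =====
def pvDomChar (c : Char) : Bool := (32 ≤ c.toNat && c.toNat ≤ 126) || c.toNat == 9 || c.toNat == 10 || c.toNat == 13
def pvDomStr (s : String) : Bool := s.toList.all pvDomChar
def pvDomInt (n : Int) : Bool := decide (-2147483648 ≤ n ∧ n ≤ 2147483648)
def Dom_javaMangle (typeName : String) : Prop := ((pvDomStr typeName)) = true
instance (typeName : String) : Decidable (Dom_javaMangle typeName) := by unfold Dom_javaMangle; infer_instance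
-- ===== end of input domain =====

-- B replaces A's per-dimension array recursion by one loop that strips all trailing '[]'
-- and classifies the remaining core exactly once (objective: alternative decomposition).

-- ===== PORT A =====

def javaPrimitiveMangling : PySem.Dict (List Char) (List Char) :=
  ⟨[("boolean".toList, "Z".toList),
    ("char".toList,    "C".toList),
    ("double".toList,  "D".toList),
    ("float".toList,   "F".toList),
    ("int".toList,     "I".toList),
    ("long".toList,    "J".toList),
    ("short".toList,   "S".toList),
    ("void".toList,    "V".toList)]⟩

-- A's recursion, fueled (every recursive call is on a strictly shorter string,
-- so fuel = length + 1 always suffices; the fuel guard only makes it total).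
def mangleA : Nat → List Char → List Char
  | 0, _ => []
  | f + 1, cs =>
    match PySem.Dict.get? javaPrimitiveMangling cs with
    | some v => v
    | none =>
      if PySem.Chars.endswith cs "[]".toList then
        '[' :: mangleA f (PySem.List.slice cs (some 0) (some (-2)))
      else if PySem.Chars.endswith cs ">".toList then
        let openPos := PySem.Chars.find cs "<".toList
        "L".toList ++ PySem.List.slice cs none (some openPos) ++ "<".toList ++
          PySem.Chars.join []
            ((PySem.Chars.splitOn (PySem.List.slice cs (some (openPos + 1)) (some (-1))) ",".toList).map
              (mangleA f)) ++ ">;".toList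
      else
        "L".toList ++ cs ++ ";".toList

def javaMangle (typeName : String) : String :=
  String.ofList (mangleA (typeName.toList.length + 1) typeName.toList)

-- ===== PORT B =====

-- the while loop: strip every trailing '[]', counting dimensions
def stripArr (cs : List Char) : Nat × List Char :=
  if PySem.Chars.endswith cs "[]".toList then
    let p := stripArr (PySem.List.slice cs none (some (-2)))
    (p.1 + 1, p.2)
  else
    (0, cs)
termination_by cs.length
decreasing_by
  have h2 : ("[]".toList : List Char) <:+ cs := (PySem.Chars.endswith_iff _ _).mp (by assumption)
  have hlen : 2 ≤ cs.length := by
    simpa using h2.length_le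
  rw [PySem.List.slice_to_neg_ofNat cs 2 (by omega)]
  simp
  omega

-- B's recursion (only for generic type arguments), fueled the same way
def mangleB : Nat → List Char → List Char
  | 0, _ => []
  | f + 1, cs =>
    let p := stripArr cs
    let core :=
      match PySem.Dict.get? javaPrimitiveMangling p.2 with
      | some v => v
      | none =>
        if PySem.Chars.endswith p.2 ">".toList then
          let openPos := PySem.Chars.find p.2 "<".toList
          "L".toList ++ PySem.List.slice p.2 none (some openPos) ++ "<".toList ++
            PySem.Chars.join []
              ((PySem.Chars.splitOn (PySem.List.slice p.2 (some (openPos + 1)) (some (-1))) ",".toList).map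
                (mangleB f)) ++ ">;".toList
        else
          "L".toList ++ p.2 ++ ";".toList
    List.replicate p.1 '[' ++ core

def javaMangle_alt (typeName : String) : String :=
  String.ofList (mangleB (typeName.toList.length + 1) typeName.toList)

-- ===== PRECONDITION & SPEC =====
def Spec_javaMangle (typeName : String) (out : String) : Prop := out = javaMangle_alt typeName
instance (typeName : String) (out : String) : Decidable (Spec_javaMangle typeName out) := by unfold Spec_javaMangle; infer_instance

-- ===== CLAIM (what is proved, stated in full; the proofs are below) =====
def Claim_equal_javaMangle : Prop := ∀ (typeName : String), Dom_javaMangle typeName → Spec_javaMangle typeName (javaMangle typeName)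

-- ===== LEMMAS AND PROOFS =====

-- a primitive name never ends with "[]"
theorem prim_not_arr (cs v : List Char)
    (h : PySem.Dict.get? javaPrimitiveMangling cs = some v) :
    PySem.Chars.endswith cs "[]".toList = false := by
  unfold PySem.Dict.get? at h
  cases hf : List.find? (fun p => p.1 == cs) javaPrimitiveMangling.items with
  | none => rw [hf] at h; simp at h
  | some pr =>
    have hp := List.find?_some hf
    have hm := List.mem_of_find?_eq_some hf
    have hcs : pr.1 = cs := by simpa using hp
    subst hcs
    simp [javaPrimitiveMangling] at hm
    rcases hm with rfl|rfl|rfl|rfl|rfl|rfl|rfl|rfl <;> decide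

-- invariant of the split loop: every produced piece is in acc or bounded by cur + rest
theorem splitOn_go_len (sep : List Char) : ∀ (fuel : Nat) (l cur : List Char) (acc : List (List Char)) (p : List Char),
    p ∈ PySem.Chars.splitOn.go sep fuel l cur acc → p ∈ acc ∨ p.length ≤ cur.length + l.length := by
  intro fuel
  induction fuel with
  | zero =>
    intro l cur acc p hp
    simp [PySem.Chars.splitOn.go] at hp
    rcases hp with h | rfl
    · exact Or.inl h
    · right; simp
  | succ f ih =>
    intro l cur acc p hp
    cases l with
    | nil =>
      simp [PySem.Chars.splitOn.go] at hp
      rcases hp with h | rfl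
      · exact Or.inl h
      · right; simp
    | cons c rest =>
      rw [PySem.Chars.splitOn.go] at hp
      by_cases hpre : sep.isPrefixOf (c :: rest) = true
      · rw [if_pos hpre] at hp
        rcases ih _ _ _ _ hp with h | hlen
        · rcases List.mem_cons.mp h with rfl | h
          · right; simp
          · exact Or.inl h
        · right
          simp at hlen ⊢
          omega
      · rw [if_neg hpre] at hp
        rcases ih _ _ _ _ hp with h | hlen
        · exact Or.inl h
        · right; simp at hlen ⊢; omega

-- pieces of a comma split are no longer than the split string
theorem splitOn_length_le (t p : List Char)
    (h : p ∈ PySem.Chars.splitOn t ",".toList) : p.length ≤ t.length := by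
  have := splitOn_go_len ",".toList (t.length + 1) t [] [] p h
  simpa using this

-- the slice typeName[openPos+1:-1] is strictly shorter than a nonempty typeName
theorem args_slice_lt (cs : List Char) (hne : cs ≠ []) (o : Int) :
    (PySem.List.slice cs (some (o + 1)) (some (-1))).length < cs.length := by
  rw [PySem.List.length_slice]
  have h1 : PySem.List.clampIdx cs.length (-1) = cs.length - 1 := by simp
  have hlen : 0 < cs.length := List.length_pos_iff.mpr hne
  omega

-- B peels one array dimension at a time, matching A's recursion step
theorem mangleB_arr (g : Nat) (cs : List Char)
    (h : PySem.Chars.endswith cs "[]".toList = true) :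
    mangleB (g + 1) cs = '[' :: mangleB (g + 1) (PySem.List.slice cs none (some (-2))) := by
  conv_lhs => rw [mangleB]
  conv_rhs => rw [mangleB]
  rw [stripArr, if_pos h]
  simp [List.replicate_succ]

theorem mangle_eq : ∀ (f g : Nat) (cs : List Char),
    cs.length < f → cs.length < g → mangleA f cs = mangleB g cs := by
  intro f
  induction f with
  | zero => intro g cs hf; omega
  | succ f ih =>
    intro g cs hf hg
    obtain ⟨g', rfl⟩ : ∃ g', g = g' + 1 := ⟨g - 1, by omega⟩
    rw [mangleA]
    simp only [show ("[]".toList : List Char) = ['[', ']'] from rfl,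
      show (">".toList : List Char) = ['>'] from rfl,
      show ("<".toList : List Char) = ['<'] from rfl,
      show (",".toList : List Char) = [','] from rfl,
      show ("L".toList : List Char) = ['L'] from rfl,
      show (";".toList : List Char) = [';'] from rfl,
      show (">;".toList : List Char) = ['>', ';'] from rfl]
    cases hp : PySem.Dict.get? javaPrimitiveMangling cs with
    | some v =>
      have harr : PySem.Chars.endswith cs ['[', ']'] = false := prim_not_arr cs v hp
      rw [mangleB, stripArr]
      simp [harr, hp]
    | none =>
      by_cases harr : PySem.Chars.endswith cs ['[', ']'] = true
      · have hsub : (['[', ']'] : List Char) <:+ cs := (PySem.Chars.endswith_iff _ _).mp harr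
        have h2 : 2 ≤ cs.length := by simpa using hsub.length_le
        have hcut : (PySem.List.slice cs none (some (-2))).length = cs.length - 2 := by
          rw [PySem.List.slice_to_neg_ofNat cs 2 (by omega)]; simp
        rw [mangleB_arr g' cs harr]
        simp only [harr, if_pos]
        rw [show PySem.List.slice cs (some 0) (some (-2)) = PySem.List.slice cs none (some (-2)) from
          PySem.List.slice_zero_start cs (some (-2))]
        exact congrArg ('[' :: ·) (ih (g' + 1) _ (by omega) (by omega))
      · rw [mangleB, stripArr]
        simp only [show ("[]".toList : List Char) = ['[', ']'] from rfl,
      show (">".toList : List Char) = ['>'] from rfl,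
      show ("<".toList : List Char) = ['<'] from rfl,
      show (",".toList : List Char) = [','] from rfl,
      show ("L".toList : List Char) = ['L'] from rfl,
      show (";".toList : List Char) = [';'] from rfl,
      show (">;".toList : List Char) = ['>', ';'] from rfl]
        simp only [harr, if_neg, Bool.not_eq_true, hp, List.replicate, List.nil_append]
        by_cases hgt : PySem.Chars.endswith cs ['>'] = true
        · have hne : cs ≠ [] := by
            intro hnil
            rw [hnil] at hgt
            exact absurd hgt (by decide)
          simp only [hgt, if_true]
          have hmap : ∀ p ∈ PySem.Chars.splitOn
              (PySem.List.slice cs (some (PySem.Chars.find cs ['<'] + 1)) (some (-1))) [','],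
              mangleA f p = mangleB g' p := by
            intro p hpmem
            have h1 := splitOn_length_le _ _ hpmem
            have h2 := args_slice_lt cs hne (PySem.Chars.find cs ['<'])
            exact ih g' p (by omega) (by omega)
          rw [List.map_congr_left hmap]
        · simp [hgt]
-- ===== VERDICT (by name: the statement is the Claim_ definition above) =====
theorem javaMangle_spec : Claim_equal_javaMangle := by
  intro s _
  unfold Spec_javaMangle javaMangle javaMangle_alt
  rw [mangle_eq (s.toList.length + 1) (s.toList.length + 1) s.toList (by omega) (by omega)]
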